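-- pv_equiv track=rewrite | github.com/pranav-ramanathan/N3L_SciML | no_three_in_line.py | generate_triplets
-- ===== SOURCE A (Python) =====
-- def generate_triplets(n: int):
--     """Generate all unique collinear triplets within an n×n grid.
--     Returns a list of 6-tuples (i1, j1, i2, j2, i3, j3).
--     """
--     coords = [(i, j) for i in range(n) for j in range(n)]
--     triplets = []
--     for idx1 in range(len(coords)):
--         x1, y1 = coords[idx1]
--         for idx2 in range(idx1 + 1, len(coords)):
--             x2, y2 = coords[idx2]
--             for idx3 in range(idx2 + 1, len(coords)):
--                 x3, y3 = coords[idx3]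
--                 if (x2 - x1) * (y3 - y1) == (y2 - y1) * (x3 - x1):
--                     triplets.append((x1, y1, x2, y2, x3, y3))
--     return triplets
-- ===== SOURCE B (Python) =====
-- from math import gcd
--
-- def generate_triplets(n: int):
--     """Generate all unique collinear triplets within an n x n grid.
--
--     For each ordered pair of grid points (p1 < p2 in lexicographic order),
--     walk the lattice points on their line beyond p2 using the gcd-reduced
--     step vector; every such point still inside the grid is a valid third
--     point, and they come out already in p3's lexicographic (index) order.
--     """
--     triplets = []
--     for x1 in range(n):
--         for y1 in range(n):
--             for x2 in range(x1, n):
--                 for y2 in range(y1 + 1 if x2 == x1 else 0, n):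
--                     dx = x2 - x1
--                     dy = y2 - y1
--                     g = gcd(dx, dy)
--                     sx = dx // g
--                     sy = dy // g
--                     x3 = x2 + sx
--                     y3 = y2 + sy
--                     while 0 <= x3 < n and 0 <= y3 < n:
--                         triplets.append((x1, y1, x2, y2, x3, y3))
--                         x3 += sx
--                         y3 += sy
--     return triplets
-- ===== Notes on version B (the rewrite author's own statement) =====
-- stated objective: faster
-- what changed: Instead of testing every later grid point against each point pair (triple nested scan over all n^2 points), B walks, for each ordered pair, the lattice points on their line beyond the second point using the gcd-reduced step vector, producing each valid third point directly in the same order; intended as faster (O(n^6) vs O(n^4)+output): measured A times out at n=16 where B answers in ~15 ms, though the probe could not get a clean largest-size ratio since both exceed the limit on far larger n.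
import Mathlib
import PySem

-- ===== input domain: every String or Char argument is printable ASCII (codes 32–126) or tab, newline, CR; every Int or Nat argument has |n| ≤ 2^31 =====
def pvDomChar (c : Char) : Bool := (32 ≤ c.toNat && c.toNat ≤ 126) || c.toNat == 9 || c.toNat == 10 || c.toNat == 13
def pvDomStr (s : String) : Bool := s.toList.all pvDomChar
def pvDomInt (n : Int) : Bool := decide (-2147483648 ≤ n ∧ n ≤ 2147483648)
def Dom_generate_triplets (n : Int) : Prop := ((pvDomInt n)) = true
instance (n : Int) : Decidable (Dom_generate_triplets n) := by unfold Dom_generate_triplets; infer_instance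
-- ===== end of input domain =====

-- B replaces A's scan of all later grid points (third nested loop) by a walk along the
-- gcd-reduced step vector of each point pair, emitting exactly the collinear third points
-- in the same order; intended as faster (measured: A times out at n=16 where B answers in
-- ~15 ms; a timing run got no clean largest-size ratio, both exceed the limit far beyond that).

-- ===== PORT A =====
-- coords = [(i, j) for i in range(n) for j in range(n)]
def pvCoords (n : Int) : List (Int × Int) :=
  (PySem.List.pyRange 0 n 1).flatMap (fun i => (PySem.List.pyRange 0 n 1).map (fun j => (i, j)))

def generate_triplets (n : Int) : List (List Int) :=
  let coords := pvCoords n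
  -- every index drawn from range(len(coords)) (and the idx+1 sub-ranges) is in range,
  -- so pyGetD is exact for Python's coords[idx] here
  (PySem.List.pyRange 0 (coords.length : Int) 1).foldl (fun acc1 idx1 =>
    let p1 := PySem.List.pyGetD coords idx1 (0, 0)
    (PySem.List.pyRange (idx1 + 1) (coords.length : Int) 1).foldl (fun acc2 idx2 =>
      let p2 := PySem.List.pyGetD coords idx2 (0, 0)
      (PySem.List.pyRange (idx2 + 1) (coords.length : Int) 1).foldl (fun acc3 idx3 =>
        let p3 := PySem.List.pyGetD coords idx3 (0, 0)
        if (p2.1 - p1.1) * (p3.2 - p1.2) == (p2.2 - p1.2) * (p3.1 - p1.1)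
        then acc3 ++ [[p1.1, p1.2, p2.1, p2.2, p3.1, p3.2]]
        else acc3) acc2) acc1) []

-- ===== PORT B =====
-- the 'while 0 <= x3 < n and 0 <= y3 < n' loop of Source B; the fuel n.toNat is an upper
-- bound on its iteration count (the walked coordinate strictly increases and stays < n,
-- proved below), so the fuel guard only makes the recursion total and never cuts it short
def pvWalk (n sx sy x1 y1 x2 y2 : Int) : Nat → Int → Int → List (List Int) → List (List Int)
  | 0, _, _, acc => acc
  | fuel + 1, x3, y3, acc =>
    if 0 ≤ x3 ∧ x3 < n ∧ 0 ≤ y3 ∧ y3 < n then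
      pvWalk n sx sy x1 y1 x2 y2 fuel (x3 + sx) (y3 + sy) (acc ++ [[x1, y1, x2, y2, x3, y3]])
    else acc

def generate_triplets_alt (n : Int) : List (List Int) :=
  (PySem.List.pyRange 0 n 1).foldl (fun acc x1 =>
    (PySem.List.pyRange 0 n 1).foldl (fun acc y1 =>
      (PySem.List.pyRange x1 n 1).foldl (fun acc x2 =>
        (PySem.List.pyRange (if x2 == x1 then y1 + 1 else 0) n 1).foldl (fun acc y2 =>
          let dx := x2 - x1
          let dy := y2 - y1
          let g : Int := Int.gcd dx dy
          let sx := PySem.Int.floordiv dx g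
          let sy := PySem.Int.floordiv dy g
          pvWalk n sx sy x1 y1 x2 y2 n.toNat (x2 + sx) (y2 + sy) acc) acc) acc) acc) []

-- ===== PRECONDITION & SPEC =====
def Spec_generate_triplets (n : Int) (out : List (List Int)) : Prop := out = generate_triplets_alt n
instance (n : Int) (out : List (List Int)) : Decidable (Spec_generate_triplets n out) := by unfold Spec_generate_triplets; infer_instance

-- ===== CLAIM (what is proved, stated in full; the proofs are below) =====
def Claim_equal_generate_triplets : Prop := ∀ (n : Int), Dom_generate_triplets n → Spec_generate_triplets n (generate_triplets n)

-- ===== LEMMAS AND PROOFS =====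

-- lexicographic (Python tuple) order on grid points
def pvLex (p q : Int × Int) : Bool := decide (p.1 < q.1 ∨ (p.1 = q.1 ∧ p.2 < q.2))
-- membership in the n×n grid
def pvInG (n : Int) (p : Int × Int) : Bool := decide (0 ≤ p.1 ∧ p.1 < n ∧ 0 ≤ p.2 ∧ p.2 < n)
-- the collinearity test of A
def pvCol (p1 p2 q : Int × Int) : Bool :=
  (p2.1 - p1.1) * (q.2 - p1.2) == (p2.2 - p1.2) * (q.1 - p1.1)
def pvSix (p1 p2 q : Int × Int) : List Int := [p1.1, p1.2, p2.1, p2.2, q.1, q.2]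
-- the grid points strictly after p in lexicographic order
def pvAfter (n : Int) (p : Int × Int) : List (Int × Int) := (pvCoords n).filter (pvLex p)

-- mid-level form of A: structural recursion over suffixes of coords
def pvGo2 (p1 : Int × Int) : List (Int × Int) → List (List Int) → List (List Int)
  | [], acc => acc
  | p2 :: rest, acc =>
      pvGo2 p1 rest
        (rest.foldl (fun acc p3 => if pvCol p1 p2 p3 then acc ++ [pvSix p1 p2 p3] else acc) acc)
def pvGo1 : List (Int × Int) → List (List Int) → List (List Int)
  | [], acc => acc
  | p1 :: rest, acc => pvGo1 rest (pvGo2 p1 rest acc)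

-- B's per-pair step as a function of the two points
def pvStep (n : Int) (p1 p2 : Int × Int) (acc : List (List Int)) : List (List Int) :=
  let dx := p2.1 - p1.1
  let dy := p2.2 - p1.2
  let g : Int := Int.gcd dx dy
  let sx := PySem.Int.floordiv dx g
  let sy := PySem.Int.floordiv dy g
  pvWalk n sx sy p1.1 p1.2 p2.1 p2.2 n.toNat (p2.1 + sx) (p2.2 + sy) acc

-- the list of points visited by the walk
def pvWpts (n sx sy : Int) : Nat → Int × Int → List (Int × Int)
  | 0, _ => []
  | fuel + 1, p =>
      if 0 ≤ p.1 ∧ p.1 < n ∧ 0 ≤ p.2 ∧ p.2 < n then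
        p :: pvWpts n sx sy fuel (p.1 + sx, p.2 + sy)
      else []

lemma pvWalk_eq_wpts (n sx sy x1 y1 x2 y2 : Int) :
    ∀ (fuel : Nat) (x3 y3 : Int) (acc : List (List Int)),
      pvWalk n sx sy x1 y1 x2 y2 fuel x3 y3 acc
        = acc ++ (pvWpts n sx sy fuel (x3, y3)).map (fun q => pvSix (x1, y1) (x2, y2) q) := by
  intro fuel
  induction fuel with
  | zero => intro x3 y3 acc; simp [pvWalk, pvWpts]
  | succ fuel ih =>
    intro x3 y3 acc
    by_cases h : 0 ≤ x3 ∧ x3 < n ∧ 0 ≤ y3 ∧ y3 < n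
    · simp only [pvWalk, pvWpts, if_pos h, ih]
      simp [pvSix]
    · simp [pvWalk, pvWpts, if_neg h]

lemma pvCoords_mem (n : Int) (p : Int × Int) : p ∈ pvCoords n ↔ pvInG n p = true := by
  simp only [pvCoords, List.mem_flatMap, List.mem_map, PySem.List.mem_pyRange_one, pvInG,
    decide_eq_true_eq]
  constructor
  · rintro ⟨i, hi, j, hj, rfl⟩
    exact ⟨hi.1, hi.2, hj.1, hj.2⟩
  · rintro ⟨h1, h2, h3, h4⟩
    exact ⟨p.1, ⟨h1, h2⟩, p.2, ⟨h3, h4⟩, rfl⟩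

lemma pvCoords_pairwise (n : Int) : (pvCoords n).Pairwise (fun p q => pvLex p q = true) := by
  unfold pvCoords
  rw [List.pairwise_flatMap]
  constructor
  · intro a _
    rw [List.pairwise_map]
    exact (PySem.List.pairwise_lt_pyRange_one (a := (0:Int)) (b := n)).imp
      (by intro x y h; simp [pvLex, h])
  · exact (PySem.List.pairwise_lt_pyRange_one (a := (0:Int)) (b := n)).imp (by
      intro x y h p hp q hq
      simp only [List.mem_map] at hp hq
      obtain ⟨j1, _, rfl⟩ := hp
      obtain ⟨j2, _, rfl⟩ := hq
      simp [pvLex, h])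

lemma pvEq_of_pairwise_of_mem :
    ∀ (l1 l2 : List (Int × Int)), l1.Pairwise (fun p q => pvLex p q = true) →
      l2.Pairwise (fun p q => pvLex p q = true) → (∀ x, x ∈ l1 ↔ x ∈ l2) → l1 = l2 := by
  intro l1
  induction l1 with
  | nil =>
    intro l2 _ _ hm
    cases l2 with
    | nil => rfl
    | cons b t => exact absurd ((hm b).2 (by simp)) (by simp)
  | cons a t ih =>
    intro l2 h1 h2 hm
    cases l2 with
    | nil => exact absurd ((hm a).1 (by simp)) (by simp)
    | cons b t2 =>
      rw [List.pairwise_cons] at h1 h2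
      have hab : a = b := by
        have ha : a ∈ b :: t2 := (hm a).1 (by simp)
        have hb : b ∈ a :: t := (hm b).2 (by simp)
        rcases List.mem_cons.1 ha with h | h
        · exact h
        rcases List.mem_cons.1 hb with h' | h'
        · exact h'.symm
        · have r1 := h1.1 _ h'
          have r2 := h2.1 _ h
          exfalso
          simp only [pvLex, decide_eq_true_eq] at r1 r2
          omega
      subst hab
      congr 1
      refine ih t2 h1.2 h2.2 (fun x => ⟨fun hx => ?_, fun hx => ?_⟩)
      · rcases List.mem_cons.1 ((hm x).1 (List.mem_cons_of_mem _ hx)) with h | h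
        · subst h
          have := h1.1 _ hx
          simp only [pvLex, decide_eq_true_eq] at this
          omega
        · exact h
      · rcases List.mem_cons.1 ((hm x).2 (List.mem_cons_of_mem _ hx)) with h | h
        · subst h
          have := h2.1 _ hx
          simp only [pvLex, decide_eq_true_eq] at this
          omega
        · exact h

lemma pvFilter_suffix {l l1 rest : List (Int × Int)} {p : Int × Int}
    (hp : l.Pairwise (fun a b => pvLex a b = true)) (h : l = l1 ++ p :: rest) :
    l.filter (pvLex p) = rest := by
  subst h
  rw [List.pairwise_append] at hp
  obtain ⟨hl1, hpr, hcross⟩ := hp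
  rw [List.pairwise_cons] at hpr
  rw [List.filter_append]
  have e1 : l1.filter (pvLex p) = [] := by
    rw [List.filter_eq_nil_iff]
    intro a ha
    have := hcross a ha p (by simp)
    simp only [pvLex, decide_eq_true_eq] at this ⊢
    omega
  have e2 : (p :: rest).filter (pvLex p) = rest := by
    rw [List.filter_cons]
    have hpp : pvLex p p = false := by simp [pvLex]
    rw [hpp]
    simp only [Bool.false_eq_true, if_false]
    exact List.filter_eq_self.2 (fun a ha => hpr.1 a ha)
  rw [e1, e2, List.nil_append]

lemma pvWpts_mem (n sx sy : Int) :
    ∀ (fuel : Nat) (p q : Int × Int),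
      q ∈ pvWpts n sx sy fuel p ↔
        ∃ k : Nat, k < fuel ∧ q = (p.1 + k * sx, p.2 + k * sy) ∧
          ∀ j : Nat, j ≤ k → pvInG n (p.1 + j * sx, p.2 + j * sy) = true := by
  intro fuel
  induction fuel with
  | zero => intro p q; simp [pvWpts]
  | succ fuel ih =>
    intro p q
    by_cases h : 0 ≤ p.1 ∧ p.1 < n ∧ 0 ≤ p.2 ∧ p.2 < n
    · simp only [pvWpts, if_pos h, List.mem_cons, ih]
      constructor
      · rintro (rfl | ⟨k, hk, he, hall⟩)
        · exact ⟨0, by omega, by simp, by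
            intro j hj
            have : j = 0 := by omega
            subst this
            simp [pvInG, h]⟩
        · refine ⟨k + 1, by omega, by
            simp only [he, Prod.mk.injEq]
            refine ⟨by push_cast; ring, by push_cast; ring⟩, ?_⟩
          intro j hj
          cases j with
          | zero => simp [pvInG, h]
          | succ j' =>
            have := hall j' (by omega)
            have e1 : p.1 + (↑(j' + 1) : Int) * sx = p.1 + sx + (j' : Int) * sx := by push_cast; ring
            have e2 : p.2 + (↑(j' + 1) : Int) * sy = p.2 + sy + (j' : Int) * sy := by push_cast; ring
            rw [e1, e2]
            exact this
      · rintro ⟨k, hk, he, hall⟩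
        cases k with
        | zero => left; simp at he; rw [he]
        | succ k' =>
          right
          refine ⟨k', by omega, by
            simp only [he, Prod.mk.injEq]
            refine ⟨by push_cast; ring, by push_cast; ring⟩, ?_⟩
          intro j hj
          have := hall (j + 1) (by omega)
          have e1 : p.1 + sx + (j : Int) * sx = p.1 + (↑(j + 1) : Int) * sx := by push_cast; ring
          have e2 : p.2 + sy + (j : Int) * sy = p.2 + (↑(j + 1) : Int) * sy := by push_cast; ring
          rw [e1, e2]
          exact this
    · simp only [pvWpts, if_neg h, List.not_mem_nil, false_iff]
      rintro ⟨k, hk, he, hall⟩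
      have := hall 0 (by omega)
      simp [pvInG] at this
      exact h (by tauto)

lemma pvWpts_pairwise (n sx sy : Int) (hs : 0 < sx ∨ (sx = 0 ∧ 0 < sy)) :
    ∀ (fuel : Nat) (p : Int × Int), (pvWpts n sx sy fuel p).Pairwise (fun p q => pvLex p q = true) := by
  intro fuel
  induction fuel with
  | zero => intro p; simp [pvWpts]
  | succ fuel ih =>
    intro p
    by_cases h : 0 ≤ p.1 ∧ p.1 < n ∧ 0 ≤ p.2 ∧ p.2 < n
    · simp only [pvWpts, if_pos h]
      rw [List.pairwise_cons]
      refine ⟨?_, ih _⟩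
      intro q hq
      rw [pvWpts_mem] at hq
      obtain ⟨k, _, rfl, _⟩ := hq
      simp only [pvLex, decide_eq_true_eq]
      rcases hs with hx | ⟨hx0, hy⟩
      · left
        have hkx : (0:Int) ≤ (k:Int) * sx := mul_nonneg (Int.natCast_nonneg k) hx.le
        show p.1 < p.1 + sx + (k:Int) * sx
        linarith
      · right
        subst hx0
        have hky : (0:Int) ≤ (k:Int) * sy := mul_nonneg (Int.natCast_nonneg k) hy.le
        refine ⟨show p.1 = p.1 + 0 + (k:Int) * 0 by ring, ?_⟩
        show p.2 < p.2 + sy + (k:Int) * sy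
        linarith
    · simp [pvWpts, if_neg h]

lemma pvStepFacts (p1 p2 : Int × Int) (h12 : pvLex p1 p2 = true) :
    0 < (Int.gcd (p2.1 - p1.1) (p2.2 - p1.2) : Int) ∧
    p2.1 - p1.1 = (Int.gcd (p2.1 - p1.1) (p2.2 - p1.2) : Int) *
      PySem.Int.floordiv (p2.1 - p1.1) (Int.gcd (p2.1 - p1.1) (p2.2 - p1.2)) ∧
    p2.2 - p1.2 = (Int.gcd (p2.1 - p1.1) (p2.2 - p1.2) : Int) *
      PySem.Int.floordiv (p2.2 - p1.2) (Int.gcd (p2.1 - p1.1) (p2.2 - p1.2)) ∧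
    Int.gcd (PySem.Int.floordiv (p2.1 - p1.1) (Int.gcd (p2.1 - p1.1) (p2.2 - p1.2)))
            (PySem.Int.floordiv (p2.2 - p1.2) (Int.gcd (p2.1 - p1.1) (p2.2 - p1.2))) = 1 ∧
    (0 < PySem.Int.floordiv (p2.1 - p1.1) (Int.gcd (p2.1 - p1.1) (p2.2 - p1.2)) ∨
      (PySem.Int.floordiv (p2.1 - p1.1) (Int.gcd (p2.1 - p1.1) (p2.2 - p1.2)) = 0 ∧
       0 < PySem.Int.floordiv (p2.2 - p1.2) (Int.gcd (p2.1 - p1.1) (p2.2 - p1.2)))) := by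
  set dx := p2.1 - p1.1 with hdxd
  set dy := p2.2 - p1.2 with hdyd
  have hlex : 0 < dx ∨ (dx = 0 ∧ 0 < dy) := by
    simp only [pvLex, decide_eq_true_eq] at h12
    omega
  have hg : 0 < (Int.gcd dx dy : Int) := by
    have : Int.gcd dx dy ≠ 0 := by
      rw [Ne, Int.gcd_eq_zero_iff]
      omega
    omega
  have hfd : PySem.Int.floordiv dx (Int.gcd dx dy) = dx / (Int.gcd dx dy : Int) :=
    PySem.Int.floordiv_eq_ediv_of_pos hg
  have hfd' : PySem.Int.floordiv dy (Int.gcd dx dy) = dy / (Int.gcd dx dy : Int) :=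
    PySem.Int.floordiv_eq_ediv_of_pos hg
  have hdx : dx = (Int.gcd dx dy : Int) * (dx / (Int.gcd dx dy : Int)) :=
    (Int.mul_ediv_cancel' (Int.gcd_dvd_left dx dy)).symm
  have hdy : dy = (Int.gcd dx dy : Int) * (dy / (Int.gcd dx dy : Int)) :=
    (Int.mul_ediv_cancel' (Int.gcd_dvd_right dx dy)).symm
  have hco : Int.gcd (dx / (Int.gcd dx dy : Int)) (dy / (Int.gcd dx dy : Int)) = 1 :=
    Int.gcd_div_gcd_div_gcd (by exact_mod_cast hg)
  rw [hfd, hfd']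
  refine ⟨hg, hdx, hdy, hco, ?_⟩
  rcases hlex with h | ⟨h0, hpos⟩
  · left; nlinarith [hdx]
  · right
    constructor
    · rw [← hdxd] at *
      rw [h0]
      exact Int.zero_ediv _
    · nlinarith [hdy]

lemma pvCol_iff (p1 p2 q : Int × Int) (g sx sy : Int)
    (hg : 0 < g) (hdx : p2.1 - p1.1 = g * sx) (hdy : p2.2 - p1.2 = g * sy)
    (hco : Int.gcd sx sy = 1) (hpos : 0 < sx ∨ (sx = 0 ∧ 0 < sy)) :
    (pvCol p1 p2 q = true ∧ pvLex p2 q = true) ↔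
      ∃ t : Int, 1 ≤ t ∧ q.1 = p2.1 + t * sx ∧ q.2 = p2.2 + t * sy := by
  constructor
  · rintro ⟨hc, hl⟩
    simp only [pvCol, beq_iff_eq] at hc
    simp only [pvLex, decide_eq_true_eq] at hl
    have hcc : sx * (q.2 - p1.2) = sy * (q.1 - p1.1) := by
      have h' : g * (sx * (q.2 - p1.2)) = g * (sy * (q.1 - p1.1)) := by
        calc g * (sx * (q.2 - p1.2)) = (g * sx) * (q.2 - p1.2) := by ring
        _ = (g * sy) * (q.1 - p1.1) := by rw [← hdx, ← hdy]; exact hc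
        _ = g * (sy * (q.1 - p1.1)) := by ring
      exact mul_left_cancel₀ (ne_of_gt hg) h'
    rcases hpos with hsx | ⟨hsx0, hsy⟩
    · have hcop : IsCoprime sx sy := Int.isCoprime_iff_gcd_eq_one.2 hco
      have hdvd : sx ∣ sy * (q.1 - p1.1) := ⟨q.2 - p1.2, hcc.symm⟩
      have hdvd2 : sx ∣ (q.1 - p1.1) := by
        refine (hcop.dvd_of_dvd_mul_left ?_)
        exact hdvd
      obtain ⟨t', ht'⟩ := hdvd2
      have hy' : q.2 - p1.2 = sy * t' := by
        have : sx * (q.2 - p1.2) = sx * (sy * t') := by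
          rw [hcc, ht']; ring
        exact mul_left_cancel₀ (ne_of_gt hsx) this
      have hgt : g < t' := by
        rcases hl with h | ⟨he, hy2⟩
        · nlinarith
        · by_contra hng
          have hteq : t' = g := by nlinarith
          rw [hteq] at hy'
          have : q.2 = p2.2 := by nlinarith
          omega
      exact ⟨t' - g, by omega, by nlinarith, by nlinarith⟩
    · subst hsx0
      have hdx0 : p2.1 - p1.1 = 0 := by rw [hdx]; ring
      have hsy1 : sy = 1 := by
        simp [Int.gcd] at hco
        omega
      have hq1 : q.1 = p1.1 := by
        have : sy * (q.1 - p1.1) = 0 := by rw [← hcc]; ring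
        have := mul_eq_zero.1 this
        rcases this with h | h
        · omega
        · omega
      rcases hl with h | ⟨he, hy2⟩
      · omega
      · exact ⟨q.2 - p2.2, by omega, by omega, by rw [hsy1]; omega⟩
  · rintro ⟨t, ht, hq1, hq2⟩
    constructor
    · simp only [pvCol, beq_iff_eq]
      have e1 : q.1 - p1.1 = (g + t) * sx := by rw [hq1]; nlinarith [hdx]
      have e2 : q.2 - p1.2 = (g + t) * sy := by rw [hq2]; nlinarith [hdy]
      rw [e1, e2, hdx, hdy]; ring
    · simp only [pvLex, decide_eq_true_eq]
      rcases hpos with hsx | ⟨hsx0, hsy⟩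
      · left; nlinarith
      · right
        subst hsx0
        constructor
        · omega
        · nlinarith

lemma pvBetween (a s t m n' : Int) (h0 : 0 ≤ a) (h1 : a < n') (h2 : 0 ≤ a + t * s)
    (h3 : a + t * s < n') (hm0 : 0 ≤ m) (hmt : m ≤ t) : 0 ≤ a + m * s ∧ a + m * s < n' := by
  rcases le_total 0 s with hs | hs
  · exact ⟨by nlinarith, by nlinarith⟩
  · exact ⟨by nlinarith, by nlinarith⟩

lemma pvWpts_mem_iff (n sx sy : Int) (p2 : Int × Int) (hg2 : pvInG n p2 = true)
    (hpos : 0 < sx ∨ (sx = 0 ∧ 0 < sy)) (q : Int × Int) :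
    q ∈ pvWpts n sx sy n.toNat (p2.1 + sx, p2.2 + sy) ↔
      (pvInG n q = true ∧ ∃ t : Int, 1 ≤ t ∧ q.1 = p2.1 + t * sx ∧ q.2 = p2.2 + t * sy) := by
  simp only [pvInG, decide_eq_true_eq] at hg2 ⊢
  rw [pvWpts_mem]
  constructor
  · rintro ⟨k, hk, rfl, hall⟩
    have hin := hall k le_rfl
    simp only [pvInG, decide_eq_true_eq] at hin
    refine ⟨by simpa using hin, (k : Int) + 1, by omega, by simp only; ring, by simp only; ring⟩
  · rintro ⟨hq, t, ht, hq1, hq2⟩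
    refine ⟨(t - 1).toNat, ?_, ?_, ?_⟩
    · -- t ≤ n via the strictly increasing coordinate
      rcases hpos with hsx | ⟨hsx0, hsy⟩
      · have : t * sx ≥ t := by nlinarith
        omega
      · subst hsx0
        have : t * sy ≥ t := by nlinarith
        omega
    · have hc : ((t - 1).toNat : Int) = t - 1 := by omega
      simp only [hc, Prod.ext_iff] at *
      constructor
      · rw [hq1]; ring
      · rw [hq2]; ring
    · intro j hj
      have hc : (j : Int) ≤ t - 1 := by omega
      simp only [pvInG, decide_eq_true_eq]
      have e1 : p2.1 + sx + (j : Int) * sx = p2.1 + ((j : Int) + 1) * sx := by ring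
      have e2 : p2.2 + sy + (j : Int) * sy = p2.2 + ((j : Int) + 1) * sy := by ring
      simp only [e1, e2]
      have b1 := pvBetween p2.1 sx t ((j : Int) + 1) n hg2.1 hg2.2.1 (by omega) (by omega)
        (by omega) (by omega)
      have b2 := pvBetween p2.2 sy t ((j : Int) + 1) n hg2.2.2.1 hg2.2.2.2 (by omega) (by omega)
        (by omega) (by omega)
      exact ⟨b1.1, b1.2, b2.1, b2.2⟩

lemma pvKey (n : Int) (p1 p2 : Int × Int) (_h1 : pvInG n p1 = true) (h2 : pvInG n p2 = true)
    (h12 : pvLex p1 p2 = true) :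
    (pvAfter n p2).filter (pvCol p1 p2)
      = pvWpts n (PySem.Int.floordiv (p2.1 - p1.1) (Int.gcd (p2.1 - p1.1) (p2.2 - p1.2)))
               (PySem.Int.floordiv (p2.2 - p1.2) (Int.gcd (p2.1 - p1.1) (p2.2 - p1.2)))
               n.toNat
               (p2.1 + PySem.Int.floordiv (p2.1 - p1.1) (Int.gcd (p2.1 - p1.1) (p2.2 - p1.2)),
                p2.2 + PySem.Int.floordiv (p2.2 - p1.2) (Int.gcd (p2.1 - p1.1) (p2.2 - p1.2))) := by
  obtain ⟨hg, hdx, hdy, hco, hpos⟩ := pvStepFacts p1 p2 h12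
  apply pvEq_of_pairwise_of_mem
  · exact ((pvCoords_pairwise n).filter _).filter _
  · exact pvWpts_pairwise n _ _ hpos _ _
  · intro x
    rw [List.mem_filter, pvWpts_mem_iff n _ _ p2 h2 hpos x]
    unfold pvAfter
    rw [List.mem_filter, pvCoords_mem]
    rw [← pvCol_iff p1 p2 x _ _ _ hg hdx hdy hco hpos]
    tauto

lemma pvWalk_eq' (n : Int) (p1 p2 : Int × Int) (fuel : Nat) (x3 y3 sx sy : Int)
    (acc : List (List Int)) :
    pvWalk n sx sy p1.1 p1.2 p2.1 p2.2 fuel x3 y3 acc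
      = acc ++ (pvWpts n sx sy fuel (x3, y3)).map (fun q => pvSix p1 p2 q) := by
  rw [pvWalk_eq_wpts]

lemma pvInner_eq_step (n : Int) (p1 p2 : Int × Int) (h1 : pvInG n p1 = true)
    (h2 : pvInG n p2 = true) (h12 : pvLex p1 p2 = true) (acc : List (List Int)) :
    (pvAfter n p2).foldl (fun acc p3 => if pvCol p1 p2 p3 then acc ++ [pvSix p1 p2 p3] else acc) acc
      = pvStep n p1 p2 acc := by
  rw [PySem.List.foldl_append_if (pvCol p1 p2) (pvSix p1 p2) (pvAfter n p2) acc]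
  unfold pvStep
  rw [pvWalk_eq' n p1 p2, pvKey n p1 p2 h1 h2 h12]

lemma pvLex_trans {a b c : Int × Int} (h1 : pvLex a b = true) (h2 : pvLex b c = true) :
    pvLex a c = true := by
  simp only [pvLex, decide_eq_true_eq] at *
  omega

lemma pvAfter_after (n : Int) (p1 p2 : Int × Int) (h12 : pvLex p1 p2 = true) :
    (pvAfter n p1).filter (pvLex p2) = pvAfter n p2 := by
  unfold pvAfter
  rw [List.filter_filter]
  apply List.filter_congr
  intro q _
  cases hq : pvLex p2 q with
  | true => simp [pvLex_trans h12 hq]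
  | false => simp

lemma pvAfter_pairwise (n : Int) (p : Int × Int) :
    (pvAfter n p).Pairwise (fun a b => pvLex a b = true) :=
  (pvCoords_pairwise n).filter _

lemma pvGo2_eq (n : Int) (p1 : Int × Int) (h1 : pvInG n p1 = true) :
    ∀ (l l1 : List (Int × Int)) (acc : List (List Int)), pvAfter n p1 = l1 ++ l →
      pvGo2 p1 l acc = l.foldl (fun acc p2 => pvStep n p1 p2 acc) acc := by
  intro l
  induction l with
  | nil => intro l1 acc _; rfl
  | cons p2 rest ih =>
    intro l1 acc h
    have hmem : p2 ∈ pvAfter n p1 := by rw [h]; simp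
    have hlex : pvLex p1 p2 = true := (List.mem_filter.1 hmem).2
    have h2 : pvInG n p2 = true := by
      rw [← pvCoords_mem]
      exact (List.mem_filter.1 hmem).1
    have hrest : rest = pvAfter n p2 := by
      rw [← pvFilter_suffix (pvAfter_pairwise n p1) h, pvAfter_after n p1 p2 hlex]
    show pvGo2 p1 rest _ = _
    rw [ih (l1 ++ [p2]) _ (by rw [h]; simp)]
    rw [List.foldl_cons]
    congr 1
    rw [← pvInner_eq_step n p1 p2 h1 h2 hlex acc, hrest]

lemma pvGo1_eq (n : Int) :
    ∀ (l l1 : List (Int × Int)) (acc : List (List Int)), pvCoords n = l1 ++ l →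
      pvGo1 l acc
        = l.foldl (fun acc p1 => (pvAfter n p1).foldl (fun acc p2 => pvStep n p1 p2 acc) acc) acc := by
  intro l
  induction l with
  | nil => intro l1 acc _; rfl
  | cons p1 rest ih =>
    intro l1 acc h
    have h1 : pvInG n p1 = true := by
      rw [← pvCoords_mem]
      rw [h]; simp
    have hrest : rest = pvAfter n p1 := by
      rw [← pvFilter_suffix (pvCoords_pairwise n) h]
      rfl
    show pvGo1 rest (pvGo2 p1 rest acc) = _
    rw [ih (l1 ++ [p1]) _ (by rw [h]; simp)]
    rw [List.foldl_cons]
    congr 1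
    rw [pvGo2_eq n p1 h1 rest [] acc (by rw [hrest]; rfl), hrest]

lemma pvA_lvl2 (cs : List (Int × Int)) (p1 : Int × Int) :
    ∀ (m k : Nat) (acc : List (List Int)), k + m = cs.length →
      (PySem.List.pyRange (k : Int) (cs.length : Int) 1).foldl (fun acc2 idx2 =>
        let p2 := PySem.List.pyGetD cs idx2 (0, 0)
        (PySem.List.pyRange (idx2 + 1) (cs.length : Int) 1).foldl (fun acc3 idx3 =>
          let p3 := PySem.List.pyGetD cs idx3 (0, 0)
          if (p2.1 - p1.1) * (p3.2 - p1.2) == (p2.2 - p1.2) * (p3.1 - p1.1)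
          then acc3 ++ [[p1.1, p1.2, p2.1, p2.2, p3.1, p3.2]]
          else acc3) acc2) acc
      = pvGo2 p1 (cs.drop k) acc := by
  intro m
  induction m with
  | zero =>
    intro k acc hk
    rw [PySem.List.pyRange_one_eq_nil (by omega), List.drop_of_length_le (by omega)]
    rfl
  | succ m ih =>
    intro k acc hk
    have hkl : k < cs.length := by omega
    have hcast : ((k : Int) + 1) = ((k + 1 : Nat) : Int) := by push_cast; ring
    rw [PySem.List.pyRange_one_cons (by exact_mod_cast Nat.cast_lt.2 hkl), List.foldl_cons, hcast,
      ih (k + 1) _ (by omega), List.drop_eq_getElem_cons hkl]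
    simp only [pvGo2]
    congr 1
    have hp2 : PySem.List.pyGetD cs (k : Int) (0, 0) = (cs[k]'hkl) := by
      rw [PySem.List.pyGetD_eq_getElem cs (0, 0) (by omega) (by exact_mod_cast hkl)]
      simp
    rw [hp2]
    rw [PySem.List.foldl_pyRange_pyGetD' cs (0, 0)
      (fun acc3 p3 => if (((cs[k]'hkl)).1 - p1.1) * (p3.2 - p1.2)
          == (((cs[k]'hkl)).2 - p1.2) * (p3.1 - p1.1)
        then acc3 ++ [[p1.1, p1.2, ((cs[k]'hkl)).1, ((cs[k]'hkl)).2, p3.1, p3.2]]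
        else acc3) acc (by omega)]
    simp [pvCol, pvSix]

lemma pvA_lvl1 (cs : List (Int × Int)) :
    ∀ (m k : Nat) (acc : List (List Int)), k + m = cs.length →
      (PySem.List.pyRange (k : Int) (cs.length : Int) 1).foldl (fun acc1 idx1 =>
        let p1 := PySem.List.pyGetD cs idx1 (0, 0)
        (PySem.List.pyRange (idx1 + 1) (cs.length : Int) 1).foldl (fun acc2 idx2 =>
          let p2 := PySem.List.pyGetD cs idx2 (0, 0)
          (PySem.List.pyRange (idx2 + 1) (cs.length : Int) 1).foldl (fun acc3 idx3 =>
            let p3 := PySem.List.pyGetD cs idx3 (0, 0)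
            if (p2.1 - p1.1) * (p3.2 - p1.2) == (p2.2 - p1.2) * (p3.1 - p1.1)
            then acc3 ++ [[p1.1, p1.2, p2.1, p2.2, p3.1, p3.2]]
            else acc3) acc2) acc1) acc
      = pvGo1 (cs.drop k) acc := by
  intro m
  induction m with
  | zero =>
    intro k acc hk
    rw [PySem.List.pyRange_one_eq_nil (by omega), List.drop_of_length_le (by omega)]
    rfl
  | succ m ih =>
    intro k acc hk
    have hkl : k < cs.length := by omega
    have hcast : ((k : Int) + 1) = ((k + 1 : Nat) : Int) := by push_cast; ring
    rw [PySem.List.pyRange_one_cons (by exact_mod_cast Nat.cast_lt.2 hkl), List.foldl_cons, hcast,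
      ih (k + 1) _ (by omega), List.drop_eq_getElem_cons hkl]
    simp only [pvGo1]
    congr 1
    have hp2 : PySem.List.pyGetD cs (k : Int) (0, 0) = (cs[k]'hkl) := by
      rw [PySem.List.pyGetD_eq_getElem cs (0, 0) (by omega) (by exact_mod_cast hkl)]
      simp
    rw [hp2]
    exact pvA_lvl2 cs (cs[k]'hkl) m (k + 1) acc (by omega)

lemma pvA_eq_go1 (n : Int) : generate_triplets n = pvGo1 (pvCoords n) [] := by
  have h := pvA_lvl1 (pvCoords n) (pvCoords n).length 0 [] (by omega)
  rw [List.drop_zero] at h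
  exact h

lemma pvAfter_eq (n x1 y1 : Int) (hx0 : 0 ≤ x1) (hx1 : x1 < n) (hy0 : 0 ≤ y1) (_hy1 : y1 < n) :
    pvAfter n (x1, y1) = (PySem.List.pyRange x1 n 1).flatMap (fun x2 =>
      (PySem.List.pyRange (if x2 == x1 then y1 + 1 else 0) n 1).map (fun y2 => (x2, y2))) := by
  apply pvEq_of_pairwise_of_mem
  · exact (pvCoords_pairwise n).filter _
  · rw [List.pairwise_flatMap]
    constructor
    · intro a _
      rw [List.pairwise_map]
      exact (PySem.List.pairwise_lt_pyRange_one (a := (if a == x1 then y1 + 1 else 0)) (b := n)).imp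
        (by intro x y h; simp [pvLex, h])
    · exact (PySem.List.pairwise_lt_pyRange_one (a := x1) (b := n)).imp (by
        intro x y h p hp q hq
        simp only [List.mem_map] at hp hq
        obtain ⟨j1, _, rfl⟩ := hp
        obtain ⟨j2, _, rfl⟩ := hq
        simp [pvLex, h])
  · intro q
    unfold pvAfter
    rw [List.mem_filter, pvCoords_mem, List.mem_flatMap]
    simp only [pvInG, decide_eq_true_eq]
    constructor
    · rintro ⟨hin, hlex⟩
      simp only [pvLex, decide_eq_true_eq] at hlex
      refine ⟨q.1, PySem.List.mem_pyRange_one.2 ⟨by omega, by omega⟩, List.mem_map.2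
        ⟨q.2, PySem.List.mem_pyRange_one.2 ⟨?_, by omega⟩, rfl⟩⟩
      by_cases hq1 : q.1 = x1
      · simp [hq1]; omega
      · have : (q.1 == x1) = false := by simp [hq1]
        rw [this]
        simp; omega
    · rintro ⟨x2, hx2, hmap⟩
      rw [List.mem_map] at hmap
      obtain ⟨y2, hy2, rfl⟩ := hmap
      rw [PySem.List.mem_pyRange_one] at hx2 hy2
      by_cases hxx : x2 = x1
      · subst hxx
        simp only [beq_self_eq_true, if_true] at hy2
        exact ⟨by omega, by simp [pvLex]; omega⟩
      · have hb : (x2 == x1) = false := by simp [hxx]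
        rw [hb] at hy2
        simp only [Bool.false_eq_true, if_false] at hy2
        exact ⟨by omega, by simp [pvLex]; omega⟩

lemma pvB_eq_fold (n : Int) :
    generate_triplets_alt n
      = (pvCoords n).foldl
          (fun acc p1 => (pvAfter n p1).foldl (fun acc p2 => pvStep n p1 p2 acc) acc) [] := by
  unfold generate_triplets_alt pvCoords
  rw [List.foldl_flatMap]
  apply Eq.symm
  apply PySem.List.foldl_congr_mem
  intro acc x1 hx1
  rw [PySem.List.mem_pyRange_one] at hx1
  rw [List.foldl_map]
  apply PySem.List.foldl_congr_mem
  intro acc' y1 hy1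
  rw [PySem.List.mem_pyRange_one] at hy1
  show (pvAfter n (x1, y1)).foldl (fun acc p2 => pvStep n (x1, y1) p2 acc) acc' = _
  rw [pvAfter_eq n x1 y1 hx1.1 hx1.2 hy1.1 hy1.2, List.foldl_flatMap]
  apply PySem.List.foldl_congr_mem
  intro acc'' x2 _
  rw [List.foldl_map]
  rfl

-- ===== VERDICT (by name: the statement is the Claim_ definition above) =====
theorem generate_triplets_spec : Claim_equal_generate_triplets := by
  intro n _
  show generate_triplets n = generate_triplets_alt n
  rw [pvA_eq_go1, pvGo1_eq n (pvCoords n) [] [] rfl, pvB_eq_fold]
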